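-- pv_equiv track=rewrite | github.com/betaplane/cezanne | python/spatial.py | indexer
-- ===== SOURCE A (Python) =====
-- def indexer(notnull):
--     d = {}
--     for i, r in enumerate(notnull):
--         try:
--             d[tuple(r)].append(i)
--         except KeyError:
--             d[tuple(r)] = [i]
--     return d
-- ===== SOURCE B (Python) =====
-- def indexer(notnull):
--     rows = [tuple(r) for r in notnull]
--     keys = list(dict.fromkeys(rows))
--     return {k: [i for i, t in enumerate(rows) if t == k] for k in keys}
-- ===== Notes on version B (the rewrite author's own statement) =====
-- stated objective: idiomatic
-- what changed: Replaces the single try/except dict-building loop by a two-phase comprehension: ordered key dedup via dict.fromkeys, then one filtering comprehension per key collecting its indices.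
import Mathlib
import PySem

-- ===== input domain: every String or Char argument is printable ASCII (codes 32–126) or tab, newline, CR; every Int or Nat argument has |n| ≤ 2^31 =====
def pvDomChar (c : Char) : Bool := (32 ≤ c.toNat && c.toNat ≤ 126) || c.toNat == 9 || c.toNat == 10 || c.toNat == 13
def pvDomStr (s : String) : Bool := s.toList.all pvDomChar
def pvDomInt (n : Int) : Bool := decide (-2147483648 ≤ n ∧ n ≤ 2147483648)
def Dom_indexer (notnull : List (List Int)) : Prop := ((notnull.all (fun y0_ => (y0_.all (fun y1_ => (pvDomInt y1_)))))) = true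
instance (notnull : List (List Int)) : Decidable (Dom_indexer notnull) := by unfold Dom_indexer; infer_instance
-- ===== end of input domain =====

-- B replaces A's try/except accumulation loop by ordered key dedup plus a per-key filtering
-- comprehension (idiomatic restructuring, no speed claim); equal return values proved below.


-- ===== PORT A =====
-- d = {}; for i, r in enumerate(notnull): try: d[tuple(r)].append(i) except KeyError: d[tuple(r)] = [i]; return d
def indexer (notnull : List (List Int)) : List (List Int × List Int) :=
  ((PySem.List.enumerate notnull).foldl
    (fun d p =>
      match d.get? p.2 with
      | some v => d.insert p.2 (v ++ [p.1])   -- d[tuple(r)].append(i): overwrite in place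
      | none   => d.insert p.2 [p.1])         -- KeyError branch: d[tuple(r)] = [i]
    PySem.Dict.empty).items

-- ===== PORT B =====
-- rows = [tuple(r) for r in notnull]; keys = list(dict.fromkeys(rows));
-- return {k: [i for i, t in enumerate(rows) if t == k] for k in keys}
def indexer_alt (notnull : List (List Int)) : List (List Int × List Int) :=
  (PySem.List.dedup notnull).map
    (fun k => (k, ((PySem.List.enumerate notnull).filter (fun p => p.2 == k)).map (·.1)))

-- ===== PRECONDITION & SPEC =====
def Spec_indexer (notnull : List (List Int)) (out : List (List Int × List Int)) : Prop := out = indexer_alt notnull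
instance (notnull : List (List Int)) (out : List (List Int × List Int)) : Decidable (Spec_indexer notnull out) := by unfold Spec_indexer; infer_instance

-- ===== CLAIM (what is proved, stated in full; the proofs are below) =====
def Claim_equal_indexer : Prop := ∀ (notnull : List (List Int)), Dom_indexer notnull → Spec_indexer notnull (indexer notnull)

-- ===== LEMMAS AND PROOFS =====

-- A's per-element step (lookup, then append-in-place or fresh insert) is Dict.modify with default [].
theorem indexer_step_eq_modify (d : PySem.Dict (List Int) (List Int)) (p : Int × List Int) :
    (match d.get? p.2 with
      | some v => d.insert p.2 (v ++ [p.1])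
      | none   => d.insert p.2 [p.1]) = d.modify p.2 [] (· ++ [p.1]) := by
  cases h : d.get? p.2 <;>
    simp [PySem.Dict.modify, PySem.Dict.insert, PySem.Dict.getD_eq_get?_getD, h]

-- The heart of the equivalence: A's grouping fold, written as a modify-fold over the swapped
-- (key, value) pairs, has keys = dedup notnull and per-key value = the filtered index list.
theorem indexer_items_eq (notnull : List (List Int)) :
    indexer notnull = indexer_alt notnull := by
  unfold indexer indexer_alt
  have hfun : (fun (d : PySem.Dict (List Int) (List Int)) (p : Int × List Int) =>
      match d.get? p.2 with
      | some v => d.insert p.2 (v ++ [p.1])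
      | none   => d.insert p.2 [p.1]) = fun d p => d.modify p.2 [] (· ++ [p.1]) :=
    funext fun d => funext fun p => indexer_step_eq_modify d p
  rw [hfun]
  set L := PySem.List.enumerate notnull with hL
  have h1 : L.foldl (fun d p => d.modify p.2 [] (· ++ [p.1])) PySem.Dict.empty
      = (L.map Prod.swap).foldl (fun d p => d.modify p.1 [] (· ++ [p.2])) PySem.Dict.empty := by
    rw [List.foldl_map]; rfl
  rw [h1]
  set D := (L.map Prod.swap).foldl (fun d p => d.modify p.1 [] (· ++ [p.2])) PySem.Dict.empty with hD
  have hkeys : D.keys = PySem.List.dedup notnull := by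
    rw [hD, PySem.Dict.keys_foldl_modify_key]
    simp only [PySem.Dict.keys_empty, PySem.Set.update_nil_left, List.map_map]
    have hfs : (Prod.fst ∘ Prod.swap : (Int × List Int) → List Int) = Prod.snd := rfl
    rw [hfs, hL]
    simp [PySem.List.map_snd_enumerate, PySem.List.dedup_eq_ofList]
  have hnd : D.keys.Nodup := by
    rw [hkeys]; exact PySem.List.nodup_dedup notnull
  rw [PySem.Dict.items_eq_map_keys D hnd [], hkeys]
  refine List.map_congr_left ?_
  intro k hk
  have hg : D.getD k [] = ((L.map Prod.swap).filter (fun p => p.1 == k)).map (·.2) := by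
    rw [hD, PySem.Dict.getD_foldl_modify_append]
    simp
  rw [hg, List.filter_map, List.map_map]
  rfl

-- ===== VERDICT (by name: the statement is the Claim_ definition above) =====
theorem indexer_spec : Claim_equal_indexer := by
  intro notnull _
  unfold Spec_indexer
  exact indexer_items_eq notnull
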